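-- pv_equiv track=rewrite | github.com/GreenTrafficLight/Macross-30-Blender-Addon | Utilities/functions.py | StripToTriangle
-- ===== SOURCE A (Python) =====
-- def StripToTriangle(triangleStripList, windingOrder="abc"):
--     faces = []
--     cte = 0
--     for i in range(2, len(triangleStripList)):
--         if triangleStripList[i] == 65535 or triangleStripList[i - 1] == 65535 or triangleStripList[i - 2] == 65535:
--             if i % 2 == 0:
--                 cte = -1
--             else:
--                 cte = 0
--             pass
--         else:
--             if (i + cte) % 2 == 0:
--                 a = triangleStripList[i - 2]
--                 b = triangleStripList[i - 1]
--                 c = triangleStripList[i]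
--             else:
--                 a = triangleStripList[i - 1]
--                 b = triangleStripList[i - 2]
--                 c = triangleStripList[i]
--
--             if a != b and b != c and c != a:
--                 if windingOrder == "abc":
--                     faces.append([a, b, c])
--                 elif windingOrder == "cba":
--                     faces.append([c, b, a])
--     return faces
-- ===== SOURCE B (Python) =====
-- def StripToTriangle(triangleStripList, windingOrder="abc"):
--     # Partition the strip on the 65535 sentinel, then emit each segment's
--     # triangles with fresh local indices (first triangle of a segment is even/abc).
--     segments = []
--     current = []
--     for v in triangleStripList:
--         if v == 65535:
--             segments.append(current)
--             current = []
--         else: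
--             current.append(v)
--     segments.append(current)
--     faces = []
--     for seg in segments:
--         for k in range(2, len(seg)):
--             if k % 2 == 0:
--                 a, b, c = seg[k - 2], seg[k - 1], seg[k]
--             else:
--                 a, b, c = seg[k - 1], seg[k - 2], seg[k]
--             if a != b and b != c and c != a:
--                 if windingOrder == "abc":
--                     faces.append([a, b, c])
--                 elif windingOrder == "cba":
--                     faces.append([c, b, a])
--     return faces
-- ===== Notes on version B (the rewrite author's own statement) =====
-- stated objective: simpler
-- what changed: B first splits the strip into sentinel-free segments on the 65535 separator and then emits each segment's triangles with fresh local indices, replacing A's carried absolute-index-plus-cte parity-reset state.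
import Mathlib
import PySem

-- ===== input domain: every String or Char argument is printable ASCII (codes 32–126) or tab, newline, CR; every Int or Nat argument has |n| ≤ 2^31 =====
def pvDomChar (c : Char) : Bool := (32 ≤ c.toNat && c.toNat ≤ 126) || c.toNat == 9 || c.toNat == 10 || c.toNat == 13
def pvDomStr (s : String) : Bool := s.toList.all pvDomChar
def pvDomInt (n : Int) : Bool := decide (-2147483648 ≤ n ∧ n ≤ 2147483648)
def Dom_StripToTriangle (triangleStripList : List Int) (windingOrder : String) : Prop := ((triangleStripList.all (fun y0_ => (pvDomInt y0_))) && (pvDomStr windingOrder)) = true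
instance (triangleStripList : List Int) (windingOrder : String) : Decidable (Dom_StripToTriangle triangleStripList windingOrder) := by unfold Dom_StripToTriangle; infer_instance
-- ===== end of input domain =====

-- B replaces A's carried absolute-index/cte parity state by splitting the strip on the
-- 65535 sentinel first and emitting each segment's triangles with fresh local indices
-- (objective: simpler decomposition, same value).

-- ===== PORT A =====
-- indexing helper: every index the loops use is in range, so the Option default is never taken
def pvGet (xs : List Int) (i : Int) : Int := (PySem.List.pyGet? xs i).getD 0

def stepA (t : List Int) (w : String) (st : List (List Int) × Int) (i : Int) : List (List Int) × Int :=
  if pvGet t i = 65535 ∨ pvGet t (i - 1) = 65535 ∨ pvGet t (i - 2) = 65535 then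
    (st.1, if PySem.Int.mod i 2 = 0 then -1 else 0)
  else
    let a := if PySem.Int.mod (i + st.2) 2 = 0 then pvGet t (i - 2) else pvGet t (i - 1)
    let b := if PySem.Int.mod (i + st.2) 2 = 0 then pvGet t (i - 1) else pvGet t (i - 2)
    let c := pvGet t i
    if a ≠ b ∧ b ≠ c ∧ c ≠ a then
      if w = "abc" then (st.1 ++ [[a, b, c]], st.2)
      else if w = "cba" then (st.1 ++ [[c, b, a]], st.2)
      else st
    else st

def StripToTriangle (triangleStripList : List Int) (windingOrder : String) : List (List Int) :=
  ((PySem.List.pyRange 2 (triangleStripList.length : Int) 1).foldl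
      (stepA triangleStripList windingOrder) ([], 0)).1

-- ===== PORT B =====
def stepB (seg : List Int) (w : String) (faces : List (List Int)) (k : Int) : List (List Int) :=
  let a := if PySem.Int.mod k 2 = 0 then pvGet seg (k - 2) else pvGet seg (k - 1)
  let b := if PySem.Int.mod k 2 = 0 then pvGet seg (k - 1) else pvGet seg (k - 2)
  let c := pvGet seg k
  if a ≠ b ∧ b ≠ c ∧ c ≠ a then
    if w = "abc" then faces ++ [[a, b, c]]
    else if w = "cba" then faces ++ [[c, b, a]]
    else faces
  else faces

def stepSplit (st : List (List Int) × List Int) (v : Int) : List (List Int) × List Int :=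
  if v = 65535 then (st.1 ++ [st.2], []) else (st.1, st.2 ++ [v])

def StripToTriangle_alt (triangleStripList : List Int) (windingOrder : String) : List (List Int) :=
  let p := triangleStripList.foldl stepSplit ([], [])
  let segments := p.1 ++ [p.2]
  segments.foldl
    (fun faces seg =>
      (PySem.List.pyRange 2 (seg.length : Int) 1).foldl (stepB seg windingOrder) faces) []

-- ===== PRECONDITION & SPEC =====
def Spec_StripToTriangle (triangleStripList : List Int) (windingOrder : String) (out : List (List Int)) : Prop := out = StripToTriangle_alt triangleStripList windingOrder
instance (triangleStripList : List Int) (windingOrder : String) (out : List (List Int)) : Decidable (Spec_StripToTriangle triangleStripList windingOrder out) := by unfold Spec_StripToTriangle; infer_instance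

-- ===== CLAIM (what is proved, stated in full; the proofs are below) =====
def Claim_equal_StripToTriangle : Prop := ∀ (triangleStripList : List Int) (windingOrder : String), Dom_StripToTriangle triangleStripList windingOrder → Spec_StripToTriangle triangleStripList windingOrder (StripToTriangle triangleStripList windingOrder)

-- ===== LEMMAS AND PROOFS =====

-- the faces (0 or 1 of them) one clean window (a,b,c) contributes, e = "even/abc parity"
def emitF (w : String) (a b c : Int) : List (List Int) :=
  if a ≠ b ∧ b ≠ c ∧ c ≠ a then
    (if w = "abc" then [[a, b, c]] else if w = "cba" then [[c, b, a]] else [])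
  else []

-- sentinel-free window walk (B's per-segment loop, structurally)
def goP (w : String) : Int → Int → Bool → List Int → List (List Int)
  | _, _, _, [] => []
  | a, b, e, c :: r => (if e then emitF w a b c else emitF w b a c) ++ goP w b c (!e) r

-- A's walk: sentinel windows emit nothing and reset parity to "even" for the next clean window
def goE (w : String) : Int → Int → Bool → List Int → List (List Int)
  | _, _, _, [] => []
  | a, b, e, c :: r =>
      if c = 65535 ∨ b = 65535 ∨ a = 65535 then goE w b c true r
      else (if e then emitF w a b c else emitF w b a c) ++ goE w b c (!e) r

def segTri (w : String) : List Int → List (List Int)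
  | x :: y :: r => goP w x y true r
  | _ => []

def splitAux : List Int → List Int → List (List Int)
  | cur, [] => [cur]
  | cur, v :: r => if v = 65535 then cur :: splitAux [] r else splitAux (cur ++ [v]) r

def headSeg : List Int → List Int
  | [] => []
  | v :: r => if v = 65535 then [] else v :: headSeg r

def tailSegs : List Int → List (List Int)
  | [] => []
  | v :: r => if v = 65535 then splitAux [] r else tailSegs r

theorem segTri_nil (w : String) : segTri w [] = [] := rfl
theorem segTri_single (w : String) (x : Int) : segTri w [x] = [] := rfl
theorem segTri_cons (w : String) (x y : Int) (r : List Int) :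
    segTri w (x :: y :: r) = goP w x y true r := rfl

theorem modtwo (z : Int) : PySem.Int.mod z 2 = z % 2 :=
  PySem.Int.mod_eq_emod_of_pos (by omega)

theorem splitAux_eq (t cur : List Int) :
    splitAux cur t = (cur ++ headSeg t) :: tailSegs t := by
  induction t generalizing cur with
  | nil => simp [splitAux, headSeg, tailSegs]
  | cons v r ih =>
      by_cases h : v = 65535 <;> simp [splitAux, headSeg, tailSegs, h, ih]

-- B's split fold computes splitAux
theorem split_fold (t : List Int) :
    ∀ (done : List (List Int)) (cur : List Int),
      (t.foldl stepSplit (done, cur)).1 ++ [(t.foldl stepSplit (done, cur)).2]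
        = done ++ splitAux cur t := by
  induction t with
  | nil => intro done cur; simp [splitAux]
  | cons v r ih =>
      intro done cur
      by_cases h : v = 65535 <;>
        simp [stepSplit, h, splitAux, ih]

-- one clean window's contribution, as A/B's nested ifs
theorem append_emit (w : String) (a b c : Int) (faces : List (List Int)) :
    (if a ≠ b ∧ b ≠ c ∧ c ≠ a then
       (if w = "abc" then faces ++ [[a, b, c]]
        else if w = "cba" then faces ++ [[c, b, a]] else faces)
     else faces) = faces ++ emitF w a b c := by
  unfold emitF; split_ifs <;> simp

-- B's inner fold over a segment computes segTri
theorem foldB (w : String) (seg : List Int) :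
    ∀ (r : List Int) (k : Nat) (x y : Int) (faces : List (List Int)),
      2 ≤ k → seg.drop k = r →
      PySem.List.pyGet? seg ((k : Int) - 2) = some x →
      PySem.List.pyGet? seg ((k : Int) - 1) = some y →
      (PySem.List.pyRange (k : Int) (seg.length : Int) 1).foldl (stepB seg w) faces
        = faces ++ goP w x y (decide ((k : Int) % 2 = 0)) r := by
  intro r
  induction r with
  | nil =>
      intro k x y faces hk hdrop hx hy
      have hlen : seg.length ≤ k := List.drop_eq_nil_iff.mp hdrop
      rw [PySem.List.pyRange_one_eq_nil (by exact_mod_cast hlen)]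
      simp [goP]
  | cons c r' ih =>
      intro k x y faces hk hdrop hx hy
      have hklt : k < seg.length := by
        by_contra hcon
        rw [List.drop_eq_nil_of_le (by omega)] at hdrop
        exact (List.cons_ne_nil _ _) hdrop.symm
      have hc : seg[k]? = some c := by
        have h0 := congrArg (fun l => l[0]?) hdrop
        simpa [List.getElem?_drop] using h0
      have hdrop' : seg.drop (k + 1) = r' := by
        rw [← List.tail_drop, hdrop, List.tail_cons]
      have px : pvGet seg ((k : Int) - 2) = x := by simp [pvGet, hx]
      have py : pvGet seg ((k : Int) - 1) = y := by simp [pvGet, hy]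
      have pc : pvGet seg (k : Int) = c := by simp [pvGet, hc]
      rw [PySem.List.pyRange_one_cons (show (k : Int) < (seg.length : Int) by exact_mod_cast hklt)]
      rw [List.foldl_cons]
      rw [show (k : Int) + 1 = ((k + 1 : Nat) : Int) by push_cast; ring]
      rw [ih (k + 1) y c _ (by omega) hdrop'
        (by rw [show ((k + 1 : Nat) : Int) - 2 = (k : Int) - 1 by push_cast; ring]; exact hy)
        (by rw [show ((k + 1 : Nat) : Int) - 1 = (k : Int) by push_cast; ring]
            simp [PySem.List.pyGet?_natCast, hc])]
      have hpar : (decide (((k + 1 : Nat) : Int) % 2 = 0)) = !(decide ((k : Int) % 2 = 0)) := by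
        by_cases hp : (k : Int) % 2 = 0
        · have h1 : ¬ (((k + 1 : Nat) : Int) % 2 = 0) := by push_cast; omega
          simp [hp]
          all_goals omega
        · have h1 : (((k + 1 : Nat) : Int) % 2 = 0) := by push_cast; omega
          simp [hp]
          all_goals omega
      rw [hpar]
      simp only [goP]
      by_cases hp : (k : Int) % 2 = 0 <;>
        simp [stepB, px, py, pc, hp, append_emit, List.append_assoc]

theorem innerB (w : String) (seg : List Int) (faces : List (List Int)) :
    (PySem.List.pyRange 2 (seg.length : Int) 1).foldl (stepB seg w) faces
      = faces ++ segTri w seg := by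
  match seg with
  | [] => rw [PySem.List.pyRange_one_eq_nil (by norm_num)]; simp [segTri]
  | [x] => rw [PySem.List.pyRange_one_eq_nil (by norm_num)]; simp [segTri]
  | x :: y :: r =>
      have h := foldB w (x :: y :: r) r 2 x y faces (by omega) rfl
        (by norm_num [PySem.List.pyGet?_zero_cons])
        (by norm_num)
      rw [show ((2 : Nat) : Int) = (2 : Int) by norm_num] at h
      rw [h]
      norm_num [segTri]

-- A's fold computes goE
theorem foldA (w : String) (t : List Int) :
    ∀ (r : List Int) (k : Nat) (x y cte : Int) (faces : List (List Int)),
      2 ≤ k → t.drop k = r →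
      PySem.List.pyGet? t ((k : Int) - 2) = some x →
      PySem.List.pyGet? t ((k : Int) - 1) = some y →
      ((PySem.List.pyRange (k : Int) (t.length : Int) 1).foldl (stepA t w) (faces, cte)).1
        = faces ++ goE w x y (decide (((k : Int) + cte) % 2 = 0)) r := by
  intro r
  induction r with
  | nil =>
      intro k x y cte faces hk hdrop hx hy
      have hlen : t.length ≤ k := List.drop_eq_nil_iff.mp hdrop
      rw [PySem.List.pyRange_one_eq_nil (by exact_mod_cast hlen)]
      simp [goE]
  | cons c r' ih =>
      intro k x y cte faces hk hdrop hx hy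
      have hklt : k < t.length := by
        by_contra hcon
        rw [List.drop_eq_nil_of_le (by omega)] at hdrop
        exact (List.cons_ne_nil _ _) hdrop.symm
      have hc : t[k]? = some c := by
        have h0 := congrArg (fun l => l[0]?) hdrop
        simpa [List.getElem?_drop] using h0
      have hdrop' : t.drop (k + 1) = r' := by
        rw [← List.tail_drop, hdrop, List.tail_cons]
      have hx2 : PySem.List.pyGet? t (((k + 1 : Nat) : Int) - 2) = some y := by
        rw [show ((k + 1 : Nat) : Int) - 2 = (k : Int) - 1 by push_cast; ring]; exact hy
      have hy2 : PySem.List.pyGet? t (((k + 1 : Nat) : Int) - 1) = some c := by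
        rw [show ((k + 1 : Nat) : Int) - 1 = (k : Int) by push_cast; ring]
        simp [PySem.List.pyGet?_natCast, hc]
      have px : pvGet t ((k : Int) - 2) = x := by simp [pvGet, hx]
      have py : pvGet t ((k : Int) - 1) = y := by simp [pvGet, hy]
      have pc : pvGet t (k : Int) = c := by simp [pvGet, hc]
      rw [PySem.List.pyRange_one_cons (show (k : Int) < (t.length : Int) by exact_mod_cast hklt)]
      rw [List.foldl_cons]
      rw [show (k : Int) + 1 = ((k + 1 : Nat) : Int) by push_cast; ring]
      by_cases hS : c = 65535 ∨ y = 65535 ∨ x = 65535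
      · -- sentinel window: nothing emitted, cte reset
        have hstep : stepA t w (faces, cte) (k : Int)
            = (faces, if PySem.Int.mod (k : Int) 2 = 0 then -1 else 0) := by
          simp [stepA, px, py, pc, hS]
        rw [hstep, ih (k + 1) y c _ faces (by omega) hdrop' hx2 hy2]
        have hpar : (decide ((((k + 1 : Nat) : Int)
            + (if PySem.Int.mod (k : Int) 2 = 0 then -1 else 0)) % 2 = 0)) = true := by
          rw [modtwo]
          by_cases hp : (k : Int) % 2 = 0
          · rw [if_pos hp]
            simp only [decide_eq_true_eq]
            push_cast
            omega
          · rw [if_neg hp]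
            simp only [decide_eq_true_eq]
            push_cast
            omega
        rw [hpar]
        simp only [goE]
        rw [if_pos hS]
      · -- clean window
        have hcS : ¬ c = 65535 := fun h => hS (Or.inl h)
        have hyS : ¬ y = 65535 := fun h => hS (Or.inr (Or.inl h))
        have hxS : ¬ x = 65535 := fun h => hS (Or.inr (Or.inr h))
        have hstep : stepA t w (faces, cte) (k : Int)
            = (faces ++ (if ((k : Int) + cte) % 2 = 0 then emitF w x y c else emitF w y x c),
               cte) := by
          by_cases hp : ((k : Int) + cte) % 2 = 0 <;>
            simp [stepA, px, py, pc, hcS, hyS, hxS, hp, emitF] <;>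
            split_ifs <;> simp_all
        rw [hstep, ih (k + 1) y c cte _ (by omega) hdrop' hx2 hy2]
        have hpar : (decide ((((k + 1 : Nat) : Int) + cte) % 2 = 0))
            = !(decide (((k : Int) + cte) % 2 = 0)) := by
          by_cases hp : ((k : Int) + cte) % 2 = 0
          · have h1 : ¬ ((((k + 1 : Nat) : Int) + cte) % 2 = 0) := by push_cast; omega
            simp [hp]
            all_goals omega
          · have h1 : ((((k + 1 : Nat) : Int) + cte) % 2 = 0) := by push_cast; omega
            simp [hp]
            all_goals omega
        rw [hpar]
        by_cases hp : ((k : Int) + cte) % 2 = 0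
        · rw [if_pos hp]
          simp only [goE]
          rw [if_neg (by simp [hcS, hyS, hxS])]
          simp [hp, List.append_assoc]
        · rw [if_neg hp]
          simp only [goE]
          rw [if_neg (by simp [hcS, hyS, hxS])]
          simp [hp, List.append_assoc]

-- the core decomposition: A's walk equals the per-segment triangles
theorem main_split (w : String) (t : List Int) :
    (∀ a b e, ¬ a = 65535 → ¬ b = 65535 →
        goE w a b e t = goP w a b e (headSeg t) ++ (tailSegs t).flatMap (segTri w))
    ∧ (∀ a e, goE w a 65535 e t = (splitAux [] t).flatMap (segTri w))
    ∧ (∀ b e, ¬ b = 65535 → goE w 65535 b e t = (splitAux [b] t).flatMap (segTri w)) := by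
  induction t with
  | nil =>
      refine ⟨?_, ?_, ?_⟩ <;> intros <;>
        simp [goE, goP, headSeg, tailSegs, splitAux, segTri_nil, segTri_single]
  | cons c r ih =>
      obtain ⟨ihA, ihB1, ihB2⟩ := ih
      refine ⟨?_, ?_, ?_⟩
      · intro a b e ha hb
        by_cases hc : c = 65535
        · subst hc
          rw [show goE w a b e (65535 :: r) = goE w b 65535 true r from by simp [goE]]
          rw [ihB1 b true]
          rw [show headSeg (65535 :: r) = [] from by simp [headSeg]]
          rw [show tailSegs (65535 :: r) = splitAux [] r from by simp [tailSegs]]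
          simp [goP]
        · rw [show goE w a b e (c :: r)
                = (if e then emitF w a b c else emitF w b a c) ++ goE w b c (!e) r from by
              simp [goE, hc, hb, ha]]
          rw [ihA b c (!e) hb hc]
          rw [show headSeg (c :: r) = c :: headSeg r from by simp [headSeg, hc]]
          rw [show tailSegs (c :: r) = tailSegs r from by simp [tailSegs, hc]]
          simp only [goP]
          simp [List.append_assoc]
      · intro a e
        rw [show goE w a 65535 e (c :: r) = goE w 65535 c true r from by simp [goE]]
        by_cases hc : c = 65535
        · subst hc
          rw [ihB1 65535 true]
          rw [show splitAux [] (65535 :: r) = [] :: splitAux [] r from by simp [splitAux]]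
          simp [segTri_nil]
        · rw [ihB2 c true hc]
          rw [show splitAux [] (c :: r) = splitAux [c] r from by simp [splitAux, hc]]
      · intro b e hb
        rw [show goE w 65535 b e (c :: r) = goE w b c true r from by simp [goE]]
        by_cases hc : c = 65535
        · subst hc
          rw [ihB1 b true]
          rw [show splitAux [b] (65535 :: r) = [b] :: splitAux [] r from by simp [splitAux]]
          simp [segTri_single]
        · rw [ihA b c true hb hc]
          rw [show splitAux [b] (c :: r) = splitAux [b, c] r from by simp [splitAux, hc]]
          rw [splitAux_eq]
          simp [segTri_cons]

theorem outerB (w : String) :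
    ∀ (segs : List (List Int)) (faces : List (List Int)),
      segs.foldl
          (fun faces seg =>
            (PySem.List.pyRange 2 (seg.length : Int) 1).foldl (stepB seg w) faces) faces
        = faces ++ segs.flatMap (segTri w) := by
  intro segs
  induction segs with
  | nil => intro faces; simp
  | cons s ss ih =>
      intro faces
      rw [List.foldl_cons, innerB, ih]
      simp [List.append_assoc]

theorem alt_eq (t : List Int) (w : String) :
    StripToTriangle_alt t w = (splitAux [] t).flatMap (segTri w) := by
  unfold StripToTriangle_alt
  rw [outerB]
  rw [split_fold t [] []]
  simp

theorem main_eq (t : List Int) (w : String) :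
    StripToTriangle t w = StripToTriangle_alt t w := by
  rw [alt_eq]
  match t with
  | [] =>
      unfold StripToTriangle
      rw [PySem.List.pyRange_one_eq_nil (by norm_num)]
      simp [splitAux, segTri_nil]
  | [x] =>
      unfold StripToTriangle
      rw [PySem.List.pyRange_one_eq_nil (by norm_num)]
      by_cases hx : x = 65535
      · rw [show splitAux [] [x] = [[], []] from by simp [splitAux, hx]]
        simp [segTri_nil]
      · rw [show splitAux [] [x] = [[x]] from by simp [splitAux, hx]]
        simp [segTri_single]
  | x :: y :: r =>
      unfold StripToTriangle
      have h := foldA w (x :: y :: r) r 2 x y 0 [] (by omega) rfl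
        (by norm_num [PySem.List.pyGet?_zero_cons])
        (by norm_num)
      rw [show ((2 : Nat) : Int) = (2 : Int) by norm_num] at h
      rw [h]
      norm_num
      obtain ⟨hA, hB1, hB2⟩ := main_split w r
      by_cases hy : y = 65535
      · rw [hy, hB1 x true]
        by_cases hx : x = 65535
        · rw [show splitAux [] (x :: 65535 :: r) = [] :: [] :: splitAux [] r from by
              simp [splitAux, hx]]
          simp [segTri_nil]
        · rw [show splitAux [] (x :: 65535 :: r) = [x] :: splitAux [] r from by
              simp [splitAux, hx]]
          simp [segTri_single]
      · by_cases hx : x = 65535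
        · rw [hx, hB2 y true hy]
          rw [show splitAux [] (65535 :: y :: r) = [] :: splitAux [y] r from by
              simp [splitAux, hy]]
          simp [segTri_nil]
        · rw [hA x y true hx hy]
          rw [show splitAux [] (x :: y :: r) = splitAux [x, y] r from by
              simp [splitAux, hx, hy]]
          rw [splitAux_eq]
          simp [segTri_cons]

-- ===== VERDICT (by name: the statement is the Claim_ definition above) =====
theorem StripToTriangle_spec : Claim_equal_StripToTriangle := by
  intro t w _
  unfold Spec_StripToTriangle
  exact main_eq t w
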